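-- pv_equiv track=rewrite | github.com/dfrc-korea/carpe | modules/app_chromium/firefox/firefox.py | _bookmark_dir_tree
-- ===== SOURCE A (Python) =====
-- def _bookmark_dir_tree(row, bookmark_id_title, bookmark_id_parent):
--
--     if row[1] == 1: # CASE : parent is root
--         mod_path = bookmark_id_title[row[1]] + 'root/' + row[2]
--         return mod_path
--
--     else: # CASE : parent is not root
--         mod_path = bookmark_id_title[row[1]] + '/' + row[2]
--         new_row = (row[0], bookmark_id_parent[row[1]], mod_path)
--         mod_path = _bookmark_dir_tree(new_row, bookmark_id_title, bookmark_id_parent)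
--         return mod_path
-- ===== SOURCE B (Python) =====
-- def _bookmark_dir_tree(row, bookmark_id_title, bookmark_id_parent):
--     # Phase 1: collect the ancestor id chain from row[1] up to the root id 1.
--     chain = [row[1]]
--     while chain[-1] != 1:
--         chain.append(bookmark_id_parent[chain[-1]])
--     # Phase 2: render the path root-first in one join.
--     parts = [bookmark_id_title[p] for p in reversed(chain)]
--     return parts[0] + 'root/' + '/'.join(parts[1:] + [row[2]])
-- ===== Notes on version B (the rewrite author's own statement) =====
-- stated objective: alternative
-- what changed: Replaces A's tail recursion that threads a growing path string through each call with a two-phase iterative version: first collect the ancestor id chain into a list, then render the whole path root-first with a single '/'.join.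
import Mathlib
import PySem

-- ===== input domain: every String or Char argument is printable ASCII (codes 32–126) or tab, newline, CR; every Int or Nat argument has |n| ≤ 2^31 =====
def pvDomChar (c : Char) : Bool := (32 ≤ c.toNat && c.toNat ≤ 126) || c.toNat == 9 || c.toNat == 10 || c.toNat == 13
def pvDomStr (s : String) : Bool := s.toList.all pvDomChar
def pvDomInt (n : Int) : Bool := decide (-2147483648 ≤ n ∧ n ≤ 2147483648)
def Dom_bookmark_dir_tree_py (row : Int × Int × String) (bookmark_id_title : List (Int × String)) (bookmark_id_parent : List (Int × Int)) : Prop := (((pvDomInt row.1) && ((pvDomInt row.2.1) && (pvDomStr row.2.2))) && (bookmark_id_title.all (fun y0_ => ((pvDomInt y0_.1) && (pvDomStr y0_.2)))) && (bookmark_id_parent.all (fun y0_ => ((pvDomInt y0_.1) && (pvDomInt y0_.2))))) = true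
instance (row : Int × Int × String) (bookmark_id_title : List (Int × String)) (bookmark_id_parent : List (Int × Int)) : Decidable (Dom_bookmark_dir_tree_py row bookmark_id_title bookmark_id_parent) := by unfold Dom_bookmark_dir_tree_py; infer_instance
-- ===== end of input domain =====

-- B replaces A's path-threading tail recursion by a two-phase loop: collect the ancestor
-- id chain into a list, then render the path with a single join (objective: alternative).

-- ===== PORT A =====
-- A's recursion is not structural; the fuel |bookmark_id_parent| + 2 is a totality guard
-- only: under Pre_ the parent chain reaches 1 within that many visited ids, so the fuel
-- branch is never taken on admitted inputs.  A dict lookup that would raise KeyError in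
-- Python returns the Option default here; Pre_ excludes those inputs.
def goA (bookmark_id_title : List (Int × String)) (bookmark_id_parent : List (Int × Int)) : Nat → Int × Int × String → String
  | 0, _ => ""
  | Nat.succ fuel, row =>
    if row.2.1 == 1 then
      ((PySem.Dict.mk bookmark_id_title).get? row.2.1).getD "" ++ "root/" ++ row.2.2
    else
      let mod_path := ((PySem.Dict.mk bookmark_id_title).get? row.2.1).getD "" ++ "/" ++ row.2.2
      goA bookmark_id_title bookmark_id_parent fuel
        (row.1, ((PySem.Dict.mk bookmark_id_parent).get? row.2.1).getD 0, mod_path)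

def bookmark_dir_tree_py (row : Int × Int × String) (bookmark_id_title : List (Int × String)) (bookmark_id_parent : List (Int × Int)) : String :=
  goA bookmark_id_title bookmark_id_parent (bookmark_id_parent.length + 2) row

-- ===== PORT B =====
-- Phase 1 of Source B: the while loop appending parent ids; same fuel-style totality guard.
def chainB (bookmark_id_parent : List (Int × Int)) : Nat → List Int → List Int
  | 0, acc => acc
  | Nat.succ fuel, acc =>
    if (acc.getLast?.getD 0) == 1 then acc
    else chainB bookmark_id_parent fuel
      (acc ++ [((PySem.Dict.mk bookmark_id_parent).get? (acc.getLast?.getD 0)).getD 0])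

def bookmark_dir_tree_py_alt (row : Int × Int × String) (bookmark_id_title : List (Int × String)) (bookmark_id_parent : List (Int × Int)) : String :=
  let chain := chainB bookmark_id_parent (bookmark_id_parent.length + 2) [row.2.1]
  let parts := chain.reverse.map (fun p => ((PySem.Dict.mk bookmark_id_title).get? p).getD "")
  match parts with
  | [] => ""
  | h :: t => h ++ "root/" ++ PySem.Str.join "/" (t ++ [row.2.2])

-- ===== PRECONDITION & SPEC =====
-- Pre_: some iteration count k of the parent-lookup map, bounded by |bookmark_id_parent| + 1
-- (a returning run of A visits distinct parent-keys, so the bound excludes nothing A returns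
-- on), first reaches the root id 1 from row[1], every id visited before that has a title and
-- a parent entry, and the root has a title — exactly the inputs on which the Python A
-- returns (otherwise it raises KeyError, or RecursionError on a cyclic parent chain).
def parStep (bookmark_id_parent : List (Int × Int)) (p : Int) : Int :=
  ((PySem.Dict.mk bookmark_id_parent).get? p).getD 0

def Pre_bookmark_dir_tree_py (row : Int × Int × String) (bookmark_id_title : List (Int × String)) (bookmark_id_parent : List (Int × Int)) : Prop :=
  ∃ k < bookmark_id_parent.length + 2,
    (parStep bookmark_id_parent)^[k] row.2.1 = 1 ∧
    ((PySem.Dict.mk bookmark_id_title).get? 1).isSome = true ∧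
    ∀ j < k,
      (parStep bookmark_id_parent)^[j] row.2.1 ≠ 1 ∧
      ((PySem.Dict.mk bookmark_id_title).get? ((parStep bookmark_id_parent)^[j] row.2.1)).isSome = true ∧
      ((PySem.Dict.mk bookmark_id_parent).get? ((parStep bookmark_id_parent)^[j] row.2.1)).isSome = true
instance (row : Int × Int × String) (bookmark_id_title : List (Int × String)) (bookmark_id_parent : List (Int × Int)) : Decidable (Pre_bookmark_dir_tree_py row bookmark_id_title bookmark_id_parent) := by unfold Pre_bookmark_dir_tree_py; infer_instance

def pvWitness_bookmark_dir_tree_py : (Int × Int × String) × (List (Int × String)) × (List (Int × Int)) :=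
  ((5, 2, "page"), [(1, "menu"), (2, "folder")], [(2, 1)])

def Spec_bookmark_dir_tree_py (row : Int × Int × String) (bookmark_id_title : List (Int × String)) (bookmark_id_parent : List (Int × Int)) (out : String) : Prop := out = bookmark_dir_tree_py_alt row bookmark_id_title bookmark_id_parent
instance (row : Int × Int × String) (bookmark_id_title : List (Int × String)) (bookmark_id_parent : List (Int × Int)) (out : String) : Decidable (Spec_bookmark_dir_tree_py row bookmark_id_title bookmark_id_parent out) := by unfold Spec_bookmark_dir_tree_py; infer_instance

-- ===== CLAIM (what is proved, stated in full; the proofs are below) =====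
def Claim_equal_bookmark_dir_tree_py : Prop := ∀ (row : Int × Int × String) (bookmark_id_title : List (Int × String)) (bookmark_id_parent : List (Int × Int)), Dom_bookmark_dir_tree_py row bookmark_id_title bookmark_id_parent → Pre_bookmark_dir_tree_py row bookmark_id_title bookmark_id_parent → Spec_bookmark_dir_tree_py row bookmark_id_title bookmark_id_parent (bookmark_dir_tree_py row bookmark_id_title bookmark_id_parent)

-- ===== LEMMAS AND PROOFS =====

def chainOk (bookmark_id_title : List (Int × String)) (bookmark_id_parent : List (Int × Int)) : Nat → Int → Bool
  | 0, _ => false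
  | Nat.succ fuel, p =>
    ((PySem.Dict.mk bookmark_id_title).get? p).isSome &&
    (p == 1 ||
      (((PySem.Dict.mk bookmark_id_parent).get? p).isSome &&
       chainOk bookmark_id_title bookmark_id_parent fuel
         (((PySem.Dict.mk bookmark_id_parent).get? p).getD 0)))

theorem pre_to_chainOk (bt : List (Int × String)) (bp : List (Int × Int)) :
    ∀ (k : Nat) (p : Int) (F : Nat), k < F →
      (parStep bp)^[k] p = 1 →
      ((PySem.Dict.mk bt).get? 1).isSome = true →
      (∀ j < k,
        (parStep bp)^[j] p ≠ 1 ∧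
        ((PySem.Dict.mk bt).get? ((parStep bp)^[j] p)).isSome = true ∧
        ((PySem.Dict.mk bp).get? ((parStep bp)^[j] p)).isSome = true) →
      chainOk bt bp F p = true := by
  intro k
  induction k with
  | zero =>
    intro p F hF hit h1 _
    obtain ⟨f, rfl⟩ := Nat.exists_eq_succ_of_ne_zero (Nat.pos_iff_ne_zero.mp hF)
    simp only [Function.iterate_zero, id_eq] at hit
    subst hit
    simp [chainOk, h1]
  | succ k ih =>
    intro p F hF hit h1 hall
    obtain ⟨f, rfl⟩ := Nat.exists_eq_succ_of_ne_zero (Nat.pos_iff_ne_zero.mp (Nat.lt_of_le_of_lt (Nat.zero_le _) hF))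
    have h0 := hall 0 (Nat.succ_pos _)
    simp only [Function.iterate_zero, id_eq] at h0
    have hrec : chainOk bt bp f (parStep bp p) = true := by
      apply ih (parStep bp p) f (Nat.lt_of_succ_lt_succ hF)
      · rw [← Function.iterate_succ_apply]; exact hit
      · exact h1
      · intro j hj
        have := hall (j + 1) (Nat.succ_lt_succ hj)
        rwa [Function.iterate_succ_apply] at this
    have hp1 : (p == 1) = false := by simpa using h0.1
    simp only [chainOk, h0.2.1, Bool.true_and, Bool.or_eq_true, Bool.and_eq_true]
    right
    exact ⟨h0.2.2, by simpa [parStep] using hrec⟩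

-- title lookup and suffix renderer shared by the two directions of the proof
def titleOf (bookmark_id_title : List (Int × String)) (p : Int) : String :=
  ((PySem.Dict.mk bookmark_id_title).get? p).getD ""

def renderJ (bookmark_id_title : List (Int × String)) (c : List Int) (path : String) : String :=
  PySem.Str.join "/" ((c.reverse.map (titleOf bookmark_id_title)) ++ [path])

theorem str_join_singleton (sep s : String) : PySem.Str.join sep [s] = s := by
  simp [PySem.Str.join, PySem.Chars.join, List.intercalate]

theorem chars_join_pair (sep a b : List Char) :
    ∀ t : List (List Char), PySem.Chars.join sep (t ++ [a, b]) = PySem.Chars.join sep (t ++ [a ++ sep ++ b]) := by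
  intro t
  induction t with
  | nil => simp [PySem.Chars.join, List.intercalate, List.intersperse]
  | cons x xs ih =>
    cases xs with
    | nil => simp [PySem.Chars.join, List.intercalate, List.intersperse]
    | cons y ys =>
      simp only [List.cons_append] at ih ⊢
      rw [PySem.Chars.join_cons_cons, PySem.Chars.join_cons_cons, ih]

theorem str_join_pair (t : List String) (a b : String) :
    PySem.Str.join "/" (t ++ [a, b]) = PySem.Str.join "/" (t ++ [a ++ "/" ++ b]) := by
  simp only [PySem.Str.join, List.map_append, List.map_cons, List.map_nil, String.toList_append]
  rw [chars_join_pair]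

theorem renderJ_cons (bt : List (Int × String)) (p : Int) (c : List Int) (path : String) :
    renderJ bt (p :: c) path = renderJ bt c (titleOf bt p ++ "/" ++ path) := by
  simp only [renderJ, List.reverse_cons, List.map_append, List.map_cons, List.map_nil,
    List.append_assoc, List.cons_append, List.nil_append]
  rw [str_join_pair]

-- the chain builder is append-homomorphic in its accumulator
theorem chainB_append (par : List (Int × Int)) (fuel : Nat) :
    ∀ (acc l : List Int), l ≠ [] →
      chainB par fuel (acc ++ l) = acc ++ chainB par fuel l := by
  induction fuel with
  | zero => intro acc l _; simp [chainB]
  | succ fuel ih =>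
    intro acc l hl
    have hg : (acc ++ l).getLast? = l.getLast? := by
      rw [List.getLast?_append_of_ne_nil]; exact hl
    simp only [chainB, hg]
    split
    · rfl
    · rw [List.append_assoc, ih acc (l ++ _) (by simp)]

theorem chainB_one (par : List (Int × Int)) (fuel : Nat) (p : Int) :
    chainB par (fuel + 1) [p] =
      if p == 1 then [p]
      else p :: chainB par fuel [((PySem.Dict.mk par).get? p).getD 0] := by
  have hl : (([p] : List Int).getLast?).getD 0 = p := by simp
  by_cases hp : (p == 1) = true
  · simp [chainB, hp]
  · simp only [chainB, hl, if_neg hp]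
    exact chainB_append par fuel [p] _ (by simp)

theorem chain_ends_one (bt : List (Int × String)) (bp : List (Int × Int)) :
    ∀ (fuel : Nat) (p : Int), chainOk bt bp fuel p = true →
      ∃ c, chainB bp fuel [p] = c ++ [1] := by
  intro fuel
  induction fuel with
  | zero => intro p h; simp [chainOk] at h
  | succ fuel ih =>
    intro p h
    simp only [chainOk, Bool.and_eq_true, Bool.or_eq_true] at h
    rw [chainB_one]
    by_cases hp : (p == 1) = true
    · refine ⟨[], ?_⟩
      have : p = 1 := by simpa using hp
      simp [this]
    · rcases h.2 with h1 | h2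
      · exact absurd h1 hp
      · obtain ⟨c, hc⟩ := ih _ h2.2
        exact ⟨p :: c, by simp [hp, hc]⟩

-- A's recursion renders the chain's titles around the accumulated path
theorem goA_render (bt : List (Int × String)) (bp : List (Int × Int)) (r0 : Int) :
    ∀ (fuel : Nat) (p : Int) (path : String), chainOk bt bp fuel p = true →
      goA bt bp fuel (r0, p, path) =
        titleOf bt 1 ++ "root/" ++ renderJ bt ((chainB bp fuel [p]).dropLast) path := by
  intro fuel
  induction fuel with
  | zero => intro p path h; simp [chainOk] at h
  | succ fuel ih =>
    intro p path h
    simp only [chainOk, Bool.and_eq_true, Bool.or_eq_true] at h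
    rw [chainB_one]
    by_cases hp : (p == 1) = true
    · have hp1 : p = 1 := by simpa using hp
      subst hp1
      simp [goA, renderJ, titleOf, str_join_singleton]
    · rcases h.2 with h1 | h2
      · exact absurd h1 hp
      obtain ⟨c, hc⟩ := chain_ends_one bt bp fuel _ h2.2
      rw [if_neg hp]
      have hgo : goA bt bp (fuel + 1) (r0, p, path) =
          goA bt bp fuel (r0, ((PySem.Dict.mk bp).get? p).getD 0,
            ((PySem.Dict.mk bt).get? p).getD "" ++ "/" ++ path) := by
        simp [goA, hp]
      rw [hgo, ih _ _ h2.2, hc, ← List.cons_append, List.dropLast_concat, List.dropLast_concat,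
          renderJ_cons]
      rfl

-- B renders the same thing
theorem alt_render (bt : List (Int × String)) (bp : List (Int × Int)) (r0 : Int) (p : Int) (path : String)
    (h : chainOk bt bp (bp.length + 2) p = true) :
    bookmark_dir_tree_py_alt (r0, p, path) bt bp =
      titleOf bt 1 ++ "root/" ++ renderJ bt ((chainB bp (bp.length + 2) [p]).dropLast) path := by
  obtain ⟨c, hc⟩ := chain_ends_one bt bp _ _ h
  simp only [bookmark_dir_tree_py_alt, hc, List.reverse_append, List.reverse_cons,
    List.reverse_nil, List.nil_append, List.cons_append, List.map_cons,
    List.dropLast_concat, renderJ, titleOf]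
  rfl

-- ===== VERDICT (by name: the statement is the Claim_ definition above) =====
theorem bookmark_dir_tree_py_spec : Claim_equal_bookmark_dir_tree_py := by
  intro row bt bp _ hpre
  obtain ⟨k, hk, hit, h1, hall⟩ := hpre
  have hpre : chainOk bt bp (bp.length + 2) row.2.1 = true :=
    pre_to_chainOk bt bp k row.2.1 _ hk hit h1 hall
  unfold Spec_bookmark_dir_tree_py bookmark_dir_tree_py
  obtain ⟨r0, p, path⟩ := row
  rw [goA_render bt bp r0 _ p path hpre, alt_render bt bp r0 p path hpre]
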